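-- pv_equiv track=rewrite | github.com/hardwell0101/algebraic-earnability-benchmarks | groups/Grigorchuk/Identity_Test.py | compute_projections
-- ===== SOURCE A (Python) =====
-- PROJECTION_MAP = {
--     'b': ('a', 'c'),
--     'c': ('a', 'd'),
--     'd': ('', 'b'),
-- }
--
-- KLEIN_REDUCTIONS = {
--     'bc': 'd', 'cb': 'd',
--     'cd': 'b', 'dc': 'b',
--     'bd': 'c', 'db': 'c',
-- }
--
-- def reduce_word(word: str) -> str:
--     """Apply self-inverse and Klein four reductions."""
--     if not word:
--         return ""
--
--     prev = None
--     while prev != word: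
--         prev = word
--         # Cancel duplicates
--         i = 0
--         result = []
--         while i < len(word):
--             if i + 1 < len(word) and word[i] == word[i + 1]:
--                 i += 2
--             else:
--                 result.append(word[i])
--                 i += 1
--         word = ''.join(result)
--         # Klein four reductions
--         for pair, replacement in KLEIN_REDUCTIONS.items():
--             word = word.replace(pair, replacement)
--     return word
--
-- def compute_projections(word: str) -> tuple:
--     """Compute left/right projections via wreath recursion."""
--     left_proj = []
--     right_proj = []
--     swap_parity = 0  # 0 = normal, 1 = swapped (odd number of 'a's seen)
--
--     for char in word:
--         if char == 'a':
--             swap_parity = 1 - swap_parity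
--         elif char in PROJECTION_MAP:
--             left_contrib, right_contrib = PROJECTION_MAP[char]
--             if swap_parity == 0:
--                 left_proj.append(left_contrib)
--                 right_proj.append(right_contrib)
--             else:
--                 left_proj.append(right_contrib)
--                 right_proj.append(left_contrib)
--     return (reduce_word(''.join(left_proj)), reduce_word(''.join(right_proj)))
-- ===== SOURCE B (Python) =====
-- PROJECTION_MAP = {
--     'b': ('a', 'c'),
--     'c': ('a', 'd'),
--     'd': ('', 'b'),
-- }
--
-- _KLEIN = {'b', 'c', 'd'}
--
-- def _push(stack, ch):
--     """Push one generator onto an already-reduced stack of the free product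
--     Z/2 * (Klein four): cancel equal tops, merge two Klein generators."""
--     if stack and stack[-1] == ch:
--         stack.pop()
--     elif stack and stack[-1] in _KLEIN and ch in _KLEIN:
--         stack[-1] = (_KLEIN - {stack[-1], ch}).pop()
--     else:
--         stack.append(ch)
--
-- def compute_projections(word: str) -> tuple:
--     """Compute left/right projections via wreath recursion, reducing on the fly
--     with a stack (single pass, no fixpoint rewriting)."""
--     left, right = [], []
--     swapped = False
--     for ch in word:
--         if ch == 'a':
--             swapped = not swapped
--         elif ch in PROJECTION_MAP:
--             l, r = PROJECTION_MAP[ch]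
--             if swapped:
--                 l, r = r, l
--             for g in l:
--                 _push(left, g)
--             for g in r:
--                 _push(right, g)
--     return (''.join(left), ''.join(right))
-- ===== Notes on version B (the rewrite author's own statement) =====
-- stated objective: alternative
-- what changed: Replaces the fixpoint rewriting loop (repeated cancel-pass + six str.replace passes until unchanged) by a single left-to-right pass that pushes each projected generator onto an always-reduced stack of the free product Z/2 * Klein-four, cancelling equal tops and merging two Klein generators on the fly.
import Mathlib
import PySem

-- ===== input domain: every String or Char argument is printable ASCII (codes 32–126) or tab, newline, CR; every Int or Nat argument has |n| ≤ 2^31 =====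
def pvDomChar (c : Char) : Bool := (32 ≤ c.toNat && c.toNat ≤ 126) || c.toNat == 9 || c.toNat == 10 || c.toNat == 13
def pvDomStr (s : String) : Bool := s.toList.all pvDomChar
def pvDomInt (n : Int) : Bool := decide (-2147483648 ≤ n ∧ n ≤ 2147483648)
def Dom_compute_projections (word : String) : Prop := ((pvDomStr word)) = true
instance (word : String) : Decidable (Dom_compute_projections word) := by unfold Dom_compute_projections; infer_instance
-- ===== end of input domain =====

-- B replaces A's fixpoint rewriting loop (cancel-pass + six replace-passes until unchanged) by a
-- single pass pushing each projected generator onto an always-reduced stack of the free product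
-- Z/2 * Klein-four (objective: alternative algorithm, same return value).

-- ===== PORT A =====
-- PROJECTION_MAP lookup: 'char in PROJECTION_MAP' + PROJECTION_MAP[char] (contributions as char lists; '' = [])
def projA (c : Char) : Option (List Char × List Char) :=
  if c = 'b' then some (['a'], ['c'])
  else if c = 'c' then some (['a'], ['d'])
  else if c = 'd' then some ([], ['b'])
  else none

-- KLEIN_REDUCTIONS.items() in insertion order
def kleinListA : List (List Char × List Char) :=
  [(['b','c'], ['d']), (['c','b'], ['d']), (['c','d'], ['b']),
   (['d','c'], ['b']), (['b','d'], ['c']), (['d','b'], ['c'])]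

-- the inner 'while i < len(word)' duplicate-cancelling pass of reduce_word
def cancelPassA : List Char → List Char
  | [] => []
  | [x] => [x]
  | x :: y :: rest => if x = y then cancelPassA rest else x :: cancelPassA (y :: rest)

-- 'for pair, replacement in KLEIN_REDUCTIONS.items(): word = word.replace(pair, replacement)'
def kleinStepA (w : List Char) : List Char :=
  kleinListA.foldl (fun w pr => PySem.Chars.replace w pr.1 pr.2) w

-- one body of the 'while prev != word' loop
def onePassA (w : List Char) : List Char := kleinStepA (cancelPassA w)

-- ---- termination helpers for the port's fixpoint loop (cited by reduceLoopA) ----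
-- str.replace with a 2-char pattern and 1-char replacement, as structural recursion (proved equal below)
def rep2 (x y z : Char) : List Char → List Char
  | [] => []
  | [a] => [a]
  | a :: b :: rest => if a = x ∧ b = y then z :: rep2 x y z rest else a :: rep2 x y z (b :: rest)

theorem replace_go_nil (x y z : Char) :
    ∀ (fuel : Nat) (acc : List Char),
      PySem.Chars.replace.go [x, y] [z] fuel [] acc = acc.reverse := by
  intro fuel acc
  cases fuel <;> simp [PySem.Chars.replace.go]

theorem replace_go_eq_rep2 (x y z : Char) :
    ∀ (fuel : Nat) (l acc : List Char), l.length ≤ fuel →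
      PySem.Chars.replace.go [x, y] [z] fuel l acc = acc.reverse ++ rep2 x y z l := by
  intro fuel
  induction fuel with
  | zero =>
    intro l acc h
    have : l = [] := List.eq_nil_of_length_eq_zero (Nat.le_zero.mp h)
    subst this
    simp [replace_go_nil, rep2]
  | succ n ih =>
    intro l acc h
    match l with
    | [] => simp [replace_go_nil, rep2]
    | [a] =>
      simp only [PySem.Chars.replace.go]
      by_cases hp : List.isPrefixOf [x, y] [a] = true
      · simp [List.isPrefixOf] at hp
      · simp [hp, rep2, replace_go_nil]
    | a :: b :: rest =>
      simp only [PySem.Chars.replace.go]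
      by_cases hp : List.isPrefixOf [x, y] (a :: b :: rest) = true
      · have hab : x = a ∧ y = b := by
          simpa [List.isPrefixOf_cons₂] using hp
        have hlen : rest.length ≤ n := by simp at h; omega
        rw [if_pos hp]
        simp only [show [x, y].length = 2 from rfl, List.drop_succ_cons, List.drop_zero]
        rw [ih _ _ hlen]
        simp [rep2, hab.1.symm, hab.2.symm]
      · have hab : ¬ (a = x ∧ b = y) := by
          intro hc
          exact hp (by simp [hc.1, hc.2, List.isPrefixOf])
        have hlen : (b :: rest).length ≤ n := by simp at h ⊢; omega
        rw [if_neg hp, ih _ _ hlen]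
        simp [rep2, hab]

theorem replace_eq_rep2 (x y z : Char) (w : List Char) :
    PySem.Chars.replace w [x, y] [z] = rep2 x y z w := by
  simpa using replace_go_eq_rep2 x y z w.length w []

-- 'Shr f': a pass never lengthens, and an equal length means it changed nothing
def Shr (f : List Char → List Char) : Prop :=
  ∀ w, (f w).length ≤ w.length ∧ ((f w).length = w.length → f w = w)

theorem shr_comp {f g : List Char → List Char} (hf : Shr f) (hg : Shr g) :
    Shr (fun w => g (f w)) := by
  intro w
  dsimp only
  obtain ⟨h1, h2⟩ := hf w
  obtain ⟨h3, h4⟩ := hg (f w)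
  constructor
  · exact le_trans h3 h1
  · intro h
    rw [h] at h3
    have hfw : f w = w := h2 (le_antisymm h1 h3)
    rw [hfw] at h4 h ⊢
    exact h4 h

theorem shr_cancel : Shr cancelPassA := by
  intro w
  induction w using cancelPassA.induct with
  | case1 => simp [cancelPassA]
  | case2 x => simp [cancelPassA]
  | case3 y rest ih =>
    simp only [cancelPassA, if_pos rfl]
    obtain ⟨ih1, _⟩ := ih
    refine ⟨by simp; omega, fun h => ?_⟩
    simp at h; omega
  | case4 x y rest hxy ih =>
    simp only [cancelPassA, if_neg hxy]
    obtain ⟨ih1, ih2⟩ := ih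
    refine ⟨by simp at ih1 ⊢; omega, fun h => ?_⟩
    simp at h
    rw [ih2 (by simp at ih1 ⊢; omega)]

theorem shr_rep2 (x y z : Char) : Shr (rep2 x y z) := by
  intro w
  induction w using rep2.induct (x := x) (y := y) with
  | case1 => simp [rep2]
  | case2 a => simp [rep2]
  | case3 a b rest hab ih =>
    simp only [rep2, if_pos hab]
    obtain ⟨ih1, _⟩ := ih
    refine ⟨by simp at ih1 ⊢; omega, fun h => ?_⟩
    simp at h ih1; omega
  | case4 a b rest hab ih =>
    simp only [rep2, if_neg hab]
    obtain ⟨ih1, ih2⟩ := ih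
    refine ⟨by simp at ih1 ⊢; omega, fun h => ?_⟩
    simp at h
    rw [ih2 (by simp at ih1 ⊢; omega)]

theorem onePassA_eq (w : List Char) :
    onePassA w =
      rep2 'd' 'b' 'c' (rep2 'b' 'd' 'c' (rep2 'd' 'c' 'b' (rep2 'c' 'd' 'b'
        (rep2 'c' 'b' 'd' (rep2 'b' 'c' 'd' (cancelPassA w)))))) := by
  simp [onePassA, kleinStepA, kleinListA, List.foldl, replace_eq_rep2]

theorem shr_onePass : Shr onePassA := by
  have h := shr_comp (shr_comp (shr_comp (shr_comp (shr_comp (shr_comp shr_cancel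
    (shr_rep2 'b' 'c' 'd')) (shr_rep2 'c' 'b' 'd')) (shr_rep2 'c' 'd' 'b'))
    (shr_rep2 'd' 'c' 'b')) (shr_rep2 'b' 'd' 'c')) (shr_rep2 'd' 'b' 'c')
  intro w
  have hh := h w
  dsimp only at hh
  rwa [← onePassA_eq w] at hh

theorem onePassA_lt {w : List Char} (h : onePassA w ≠ w) :
    (onePassA w).length < w.length := by
  obtain ⟨h1, h2⟩ := shr_onePass w
  rcases lt_or_eq_of_le h1 with h3 | h3
  · exact h3
  · exact absurd (h2 h3) h

-- the 'while prev != word' loop of reduce_word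
def reduceLoopA (w : List Char) : List Char :=
  let w' := onePassA w
  if h : w' = w then w' else reduceLoopA w'
termination_by w.length
decreasing_by exact onePassA_lt h

-- reduce_word (the 'if not word: return ""' guard, then the loop)
def reduceWordA (w : List Char) : List Char :=
  if w = [] then [] else reduceLoopA w

-- body of the 'for char in word' loop of compute_projections
def aStep (s : Int × List (List Char) × List (List Char)) (ch : Char) :
    Int × List (List Char) × List (List Char) :=
  if ch = 'a' then (1 - s.1, s.2.1, s.2.2)
  else
    match projA ch with
    | some lr =>
        if s.1 = 0 then (s.1, s.2.1 ++ [lr.1], s.2.2 ++ [lr.2])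
        else (s.1, s.2.1 ++ [lr.2], s.2.2 ++ [lr.1])
    | none => s

def compute_projections (word : String) : String × String :=
  let s := word.toList.foldl aStep ((0 : Int), ([], []))
  (String.ofList (reduceWordA s.2.1.flatten), String.ofList (reduceWordA s.2.2.flatten))

-- ===== PORT B =====
def isKlein (c : Char) : Bool := c = 'b' || c = 'c' || c = 'd'

-- the remaining Klein generator ({'b','c','d'} - {x, ch}).pop() for distinct Klein x, ch
def third (x y : Char) : Char :=
  if x ≠ 'b' ∧ y ≠ 'b' then 'b' else if x ≠ 'c' ∧ y ≠ 'c' then 'c' else 'd'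

-- _push: stack with its top at the HEAD of the list (Source B appends at the end; same algorithm)
def push (st : List Char) (c : Char) : List Char :=
  match st with
  | [] => [c]
  | t :: rest =>
      if t = c then rest
      else if isKlein t && isKlein c then third t c :: rest
      else c :: t :: rest

-- PROJECTION_MAP contributions for the Klein generators, as char lists
def contribB (c : Char) : List Char × List Char :=
  if c = 'b' then (['a'], ['c'])
  else if c = 'c' then (['a'], ['d'])
  else (([] : List Char), ['b'])

-- body of Source B's single 'for ch in word' loop
def bStep (s : Bool × List Char × List Char) (ch : Char) : Bool × List Char × List Char :=
  if ch = 'a' then (!s.1, s.2.1, s.2.2)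
  else if isKlein ch then
    let lr := contribB ch
    if s.1 then (s.1, lr.2.foldl push s.2.1, lr.1.foldl push s.2.2)
    else (s.1, lr.1.foldl push s.2.1, lr.2.foldl push s.2.2)
  else s

def compute_projections_alt (word : String) : String × String :=
  let s := word.toList.foldl bStep (false, ([], []))
  (String.ofList s.2.1.reverse, String.ofList s.2.2.reverse)

-- ===== PRECONDITION & SPEC =====
def Spec_compute_projections (word : String) (out : String × String) : Prop := out = compute_projections_alt word
instance (word : String) (out : String × String) : Decidable (Spec_compute_projections word out) := by unfold Spec_compute_projections; infer_instance

-- ===== CLAIM (what is proved, stated in full; the proofs are below) =====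
def Claim_equal_compute_projections : Prop := ∀ (word : String), Dom_compute_projections word → Spec_compute_projections word (compute_projections word)

-- ===== LEMMAS AND PROOFS =====

-- a stack is reduced: no equal neighbours, no two adjacent Klein generators
def good : List Char → Bool
  | [] => true
  | [_] => true
  | x :: y :: r => (x != y) && !(isKlein x && isKlein y) && good (y :: r)

theorem good_cc {x y : Char} {r : List Char} :
    good (x :: y :: r) = true ↔
      x ≠ y ∧ (isKlein x = false ∨ isKlein y = false) ∧ good (y :: r) = true := by
  simp only [good, Bool.and_eq_true, bne_iff_ne, Bool.not_eq_eq_eq_not, Bool.not_true,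
    Bool.and_eq_false_iff]
  tauto

theorem good_tail {x : Char} {r : List Char} (h : good (x :: r) = true) : good r = true := by
  cases r with
  | nil => rfl
  | cons y t => exact (good_cc.mp h).2.2

theorem kleinCases {c : Char} (h : isKlein c = true) : c = 'b' ∨ c = 'c' ∨ c = 'd' := by
  simp [isKlein] at h
  tauto

theorem isKlein_third {x y : Char} (hx : isKlein x = true) (hy : isKlein y = true) :
    isKlein (third x y) = true := by
  rcases kleinCases hx with h | h | h <;> rcases kleinCases hy with h' | h' | h' <;>
    subst h <;> subst h' <;> decide

theorem third_ne_snd {t x : Char} (ht : isKlein t = true) (hx : isKlein x = true)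
    (h : t ≠ x) : third t x ≠ x := by
  rcases kleinCases ht with h1 | h1 | h1 <;> rcases kleinCases hx with h2 | h2 | h2 <;>
    subst h1 <;> subst h2 <;> first | (exact absurd rfl h) | decide

theorem third_ne_fst {t x : Char} (ht : isKlein t = true) (hx : isKlein x = true)
    (h : t ≠ x) : third t x ≠ t := by
  rcases kleinCases ht with h1 | h1 | h1 <;> rcases kleinCases hx with h2 | h2 | h2 <;>
    subst h1 <;> subst h2 <;> first | (exact absurd rfl h) | decide

theorem third_third {t x : Char} (ht : isKlein t = true) (hx : isKlein x = true)
    (h : t ≠ x) : third (third t x) x = t := by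
  rcases kleinCases ht with h1 | h1 | h1 <;> rcases kleinCases hx with h2 | h2 | h2 <;>
    subst h1 <;> subst h2 <;> first | (exact absurd rfl h) | decide

theorem third_right_cancel {x y : Char} (hx : isKlein x = true) (hy : isKlein y = true)
    (h : x ≠ y) : third x (third x y) = y := by
  rcases kleinCases hx with h1 | h1 | h1 <;> rcases kleinCases hy with h2 | h2 | h2 <;>
    subst h1 <;> subst h2 <;> first | (exact absurd rfl h) | decide

theorem third_eq_iff {t x y : Char} (ht : isKlein t = true) (hx : isKlein x = true)
    (hy : isKlein y = true) (htx : t ≠ x) (hxy : x ≠ y) :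
    (third t x = y ↔ t = third x y) := by
  rcases kleinCases ht with h1 | h1 | h1 <;> rcases kleinCases hx with h2 | h2 | h2 <;>
    rcases kleinCases hy with h3 | h3 | h3 <;> subst h1 <;> subst h2 <;> subst h3 <;>
    first | (exact absurd rfl htx) | (exact absurd rfl hxy) | decide

theorem third_assoc {t x y : Char} (ht : isKlein t = true) (hx : isKlein x = true)
    (hy : isKlein y = true) (htx : t ≠ x) (hxy : x ≠ y) (h : third t x ≠ y) :
    third (third t x) y = third t (third x y) := by
  rcases kleinCases ht with h1 | h1 | h1 <;> rcases kleinCases hx with h2 | h2 | h2 <;>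
    rcases kleinCases hy with h3 | h3 | h3 <;> subst h1 <;> subst h2 <;> subst h3 <;>
    first | (exact absurd rfl htx) | (exact absurd rfl hxy) | (exact absurd rfl h) | decide

-- pushing onto a stack whose extension is still reduced just prepends
theorem push_eq_cons {st : List Char} {c : Char} (h : good (c :: st) = true) :
    push st c = c :: st := by
  cases st with
  | nil => rfl
  | cons t r =>
    obtain ⟨hne, hK, _⟩ := good_cc.mp h
    simp only [push]
    rw [if_neg (fun he => hne he.symm)]
    rw [if_neg (by rcases hK with hK | hK <;> simp [hK])]

theorem push_good {st : List Char} {c : Char} (h : good st = true) :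
    good (push st c) = true := by
  cases st with
  | nil => exact rfl
  | cons t rest =>
    simp only [push]
    by_cases h1 : t = c
    · rw [if_pos h1]
      exact good_tail h
    · rw [if_neg h1]
      by_cases h2 : (isKlein t && isKlein c) = true
      · rw [if_pos h2]
        simp only [Bool.and_eq_true] at h2
        cases rest with
        | nil => rfl
        | cons r rest' =>
          obtain ⟨_, hK, hg⟩ := good_cc.mp h
          have hKr : isKlein r = false := by
            rcases hK with hK | hK
            · rw [h2.1] at hK; exact absurd hK (by simp)
            · exact hK
          refine good_cc.mpr ⟨?_, Or.inr hKr, hg⟩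
          intro he
          rw [← he, isKlein_third h2.1 h2.2] at hKr
          exact absurd hKr (by simp)
      · rw [if_neg h2]
        simp only [Bool.and_eq_true, not_and_or, Bool.not_eq_true] at h2
        refine good_cc.mpr ⟨fun he => h1 he.symm, by tauto, h⟩

theorem push_push_cancel {st : List Char} {x : Char} (h : good st = true) :
    push (push st x) x = st := by
  cases st with
  | nil => simp [push]
  | cons t rest =>
    simp only [push]
    by_cases h1 : t = x
    · rw [if_pos h1]
      subst h1
      cases rest with
      | nil => simp [push]
      | cons r rest' =>
        obtain ⟨hne, hK, _⟩ := good_cc.mp h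
        simp only [push]
        rw [if_neg (fun he => hne he.symm)]
        rw [if_neg (by rcases hK with hK | hK <;> simp [hK])]
    · rw [if_neg h1]
      by_cases h2 : (isKlein t && isKlein x) = true
      · rw [if_pos h2]
        simp only [Bool.and_eq_true] at h2
        simp only [push]
        rw [if_neg (third_ne_snd h2.1 h2.2 h1)]
        rw [if_pos (by simp [isKlein_third h2.1 h2.2, h2.2])]
        rw [third_third h2.1 h2.2 h1]
      · rw [if_neg h2]
        simp [push]

theorem push_push_klein {st : List Char} {x y : Char} (h : good st = true)
    (hx : isKlein x = true) (hy : isKlein y = true) (hxy : x ≠ y) :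
    push (push st x) y = push st (third x y) := by
  have hKxy : isKlein (third x y) = true := isKlein_third hx hy
  cases st with
  | nil =>
    simp only [push]
    rw [if_neg hxy, if_pos (by simp [hx, hy])]
  | cons t rest =>
    simp only [push]
    by_cases h1 : t = x
    · rw [if_pos h1]
      subst h1
      cases rest with
      | nil =>
        simp only [push]
        rw [if_neg (fun he => third_ne_fst hx hy hxy he.symm)]
        rw [if_pos (by simp [hx, hKxy])]
        rw [third_right_cancel hx hy hxy]
      | cons r rest' =>
        obtain ⟨hne, hK, _⟩ := good_cc.mp h
        have hKr : isKlein r = false := by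
          rcases hK with hK | hK
          · rw [hx] at hK; exact absurd hK (by simp)
          · exact hK
        simp only [push]
        have hry : ¬ r = y := fun he => by rw [he, hy] at hKr; exact absurd hKr (by simp)
        rw [if_neg hry, if_neg (by simp [hKr])]
        rw [if_neg (fun he => third_ne_fst hx hy hxy he.symm)]
        rw [if_pos (by simp [hx, hKxy])]
        rw [third_right_cancel hx hy hxy]
    · rw [if_neg h1]
      by_cases h2 : (isKlein t && isKlein x) = true
      · rw [if_pos h2]
        simp only [Bool.and_eq_true] at h2
        have hKt3 : isKlein (third t x) = true := isKlein_third h2.1 h2.2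
        simp only [push]
        by_cases h3 : third t x = y
        · rw [if_pos h3]
          have hty : t = third x y := (third_eq_iff h2.1 h2.2 hy h1 hxy).mp h3
          rw [if_pos hty]
        · rw [if_neg h3, if_pos (by simp [hKt3, hy])]
          have hty : ¬ t = third x y := fun he => h3 ((third_eq_iff h2.1 h2.2 hy h1 hxy).mpr he)
          rw [if_neg hty, if_pos (by simp [h2.1, hKxy])]
          rw [third_assoc h2.1 h2.2 hy h1 hxy h3]
      · rw [if_neg h2]
        simp only [Bool.and_eq_true, not_and_or, Bool.not_eq_true] at h2
        have hKt : isKlein t = false := by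
          rcases h2 with h2 | h2
          · exact h2
          · rw [hx] at h2; exact absurd h2 (by simp)
        simp only [push]
        rw [if_neg hxy, if_pos (by simp [hx, hy])]
        have hty : ¬ t = third x y := fun he => by
          rw [he, hKxy] at hKt; exact absurd hKt (by simp)
        rw [if_neg hty, if_neg (by simp [hKt])]

theorem foldl_push_cancelPass : ∀ (w st : List Char), good st = true →
    (cancelPassA w).foldl push st = w.foldl push st := by
  intro w
  induction w using cancelPassA.induct with
  | case1 => intro st _; rfl
  | case2 x => intro st _; rfl
  | case3 y rest ih =>
    intro st hst
    rw [show cancelPassA (y :: y :: rest) = cancelPassA rest from by simp [cancelPassA]]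
    rw [ih st hst]
    simp only [List.foldl_cons]
    rw [push_push_cancel hst]
  | case4 x y rest hxy ih =>
    intro st hst
    rw [show cancelPassA (x :: y :: rest) = x :: cancelPassA (y :: rest) from by
      simp [cancelPassA, hxy]]
    simp only [List.foldl_cons]
    exact ih (push st x) (push_good hst)

theorem foldl_push_rep2 {x y : Char} (hx : isKlein x = true) (hy : isKlein y = true)
    (hxy : x ≠ y) {z : Char} (hz : z = third x y) : ∀ (w st : List Char), good st = true →
    (rep2 x y z w).foldl push st = w.foldl push st := by
  subst hz
  intro w
  induction w using rep2.induct (x := x) (y := y) with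
  | case1 => intro st _; rfl
  | case2 a => intro st _; rfl
  | case3 a b rest hab ih =>
    intro st hst
    obtain ⟨ha, hb⟩ := hab
    subst ha; subst hb
    rw [show rep2 a b (third a b) (a :: b :: rest) = third a b :: rep2 a b (third a b) rest from
      by simp [rep2]]
    simp only [List.foldl_cons]
    rw [ih (push st (third a b)) (push_good hst)]
    rw [push_push_klein hst hx hy hxy]
  | case4 a b rest hab ih =>
    intro st hst
    simp only [rep2, if_neg hab, List.foldl_cons]
    exact ih (push st a) (push_good hst)

theorem foldl_push_onePass (w : List Char) :
    (onePassA w).foldl push [] = w.foldl push [] := by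
  rw [onePassA_eq]
  rw [foldl_push_rep2 (by decide) (by decide) (by decide) (by decide) _ [] rfl]
  rw [foldl_push_rep2 (by decide) (by decide) (by decide) (by decide) _ [] rfl]
  rw [foldl_push_rep2 (by decide) (by decide) (by decide) (by decide) _ [] rfl]
  rw [foldl_push_rep2 (by decide) (by decide) (by decide) (by decide) _ [] rfl]
  rw [foldl_push_rep2 (by decide) (by decide) (by decide) (by decide) _ [] rfl]
  rw [foldl_push_rep2 (by decide) (by decide) (by decide) (by decide) _ [] rfl]
  exact foldl_push_cancelPass w [] rfl

-- no adjacent equal pair / no adjacent occurrence of pattern x y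
def noDup : List Char → Bool
  | x :: y :: r => (x != y) && noDup (y :: r)
  | _ => true

def noPair (x y : Char) : List Char → Bool
  | a :: b :: r => !(a = x ∧ b = y : Bool) && noPair x y (b :: r)
  | _ => true

theorem cancel_fix : ∀ {w : List Char}, cancelPassA w = w → noDup w = true := by
  intro w
  induction w using cancelPassA.induct with
  | case1 => intro _; rfl
  | case2 x => intro _; rfl
  | case3 y rest ih =>
    intro h
    exfalso
    have hlen := (shr_cancel rest).1
    have he : cancelPassA (y :: y :: rest) = cancelPassA rest := by simp [cancelPassA]
    rw [he] at h
    have := congrArg List.length h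
    simp at this
    omega
  | case4 x y rest hxy ih =>
    intro h
    have he : cancelPassA (x :: y :: rest) = x :: cancelPassA (y :: rest) := by
      simp [cancelPassA, hxy]
    rw [he, List.cons.injEq] at h
    simp only [noDup, Bool.and_eq_true, bne_iff_ne]
    exact ⟨hxy, ih h.2⟩

theorem rep2_fix {x y z : Char} : ∀ {w : List Char}, rep2 x y z w = w → noPair x y w = true := by
  intro w
  induction w using rep2.induct (x := x) (y := y) with
  | case1 => intro _; rfl
  | case2 a => intro _; rfl
  | case3 a b rest hab ih =>
    intro h
    exfalso
    have hlen := (shr_rep2 x y z rest).1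
    rw [show rep2 x y z (a :: b :: rest) = z :: rep2 x y z rest by simp [rep2, hab]] at h
    have := congrArg List.length h
    simp at this
    omega
  | case4 a b rest hab ih =>
    intro h
    rw [show rep2 x y z (a :: b :: rest) = a :: rep2 x y z (b :: rest) by
      simp [rep2, hab]] at h
    rw [List.cons.injEq] at h
    simp only [noPair, Bool.and_eq_true]
    refine ⟨by rw [Bool.not_eq_true', decide_eq_false_iff_not]; exact hab, ih h.2⟩

theorem noDup_noPair_good : ∀ {w : List Char}, noDup w = true →
    noPair 'b' 'c' w = true → noPair 'c' 'b' w = true → noPair 'c' 'd' w = true →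
    noPair 'd' 'c' w = true → noPair 'b' 'd' w = true → noPair 'd' 'b' w = true →
    good w = true := by
  intro w
  induction w with
  | nil => intro _ _ _ _ _ _ _; rfl
  | cons a t ih =>
    cases t with
    | nil => intro _ _ _ _ _ _ _; rfl
    | cons b r =>
      intro hd h1 h2 h3 h4 h5 h6
      simp only [noDup, noPair, Bool.and_eq_true, bne_iff_ne] at hd h1 h2 h3 h4 h5 h6
      refine good_cc.mpr ⟨hd.1, ?_, ih hd.2 h1.2 h2.2 h3.2 h4.2 h5.2 h6.2⟩
      by_contra hKc
      push_neg at hKc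
      obtain ⟨hKa, hKb⟩ := hKc
      simp only [ne_eq, Bool.not_eq_false] at hKa hKb
      rcases kleinCases hKa with ha | ha | ha <;> rcases kleinCases hKb with hb | hb | hb <;>
        subst ha <;> subst hb <;> simp_all

theorem fix_good {w : List Char} (h : onePassA w = w) : good w = true := by
  rw [onePassA_eq] at h
  obtain ⟨s0a, s0b⟩ := shr_cancel w
  obtain ⟨s1a, s1b⟩ := shr_rep2 'b' 'c' 'd' (cancelPassA w)
  obtain ⟨s2a, s2b⟩ := shr_rep2 'c' 'b' 'd' (rep2 'b' 'c' 'd' (cancelPassA w))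
  obtain ⟨s3a, s3b⟩ := shr_rep2 'c' 'd' 'b' (rep2 'c' 'b' 'd' (rep2 'b' 'c' 'd' (cancelPassA w)))
  obtain ⟨s4a, s4b⟩ := shr_rep2 'd' 'c' 'b'
    (rep2 'c' 'd' 'b' (rep2 'c' 'b' 'd' (rep2 'b' 'c' 'd' (cancelPassA w))))
  obtain ⟨s5a, s5b⟩ := shr_rep2 'b' 'd' 'c'
    (rep2 'd' 'c' 'b' (rep2 'c' 'd' 'b' (rep2 'c' 'b' 'd' (rep2 'b' 'c' 'd' (cancelPassA w)))))
  obtain ⟨s6a, s6b⟩ := shr_rep2 'd' 'b' 'c'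
    (rep2 'b' 'd' 'c' (rep2 'd' 'c' 'b' (rep2 'c' 'd' 'b' (rep2 'c' 'b' 'd'
      (rep2 'b' 'c' 'd' (cancelPassA w))))))
  have hlen := congrArg List.length h
  have h0 : cancelPassA w = w := s0b (by omega)
  rw [h0] at s1a s1b s2a s2b s3a s3b s4a s4b s5a s5b s6a s6b hlen h
  have h1 : rep2 'b' 'c' 'd' w = w := s1b (by omega)
  rw [h1] at s2a s2b s3a s3b s4a s4b s5a s5b s6a s6b hlen h
  have h2 : rep2 'c' 'b' 'd' w = w := s2b (by omega)
  rw [h2] at s3a s3b s4a s4b s5a s5b s6a s6b hlen h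
  have h3 : rep2 'c' 'd' 'b' w = w := s3b (by omega)
  rw [h3] at s4a s4b s5a s5b s6a s6b hlen h
  have h4 : rep2 'd' 'c' 'b' w = w := s4b (by omega)
  rw [h4] at s5a s5b s6a s6b hlen h
  have h5 : rep2 'b' 'd' 'c' w = w := s5b (by omega)
  rw [h5] at s6a s6b hlen h
  have h6 : rep2 'd' 'b' 'c' w = w := h
  exact noDup_noPair_good (cancel_fix h0) (rep2_fix h1) (rep2_fix h2) (rep2_fix h3)
    (rep2_fix h4) (rep2_fix h5) (rep2_fix h6)

theorem good_iff_chain : ∀ {w : List Char}, good w = true ↔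
    List.IsChain (fun a b => a ≠ b ∧ (isKlein a = false ∨ isKlein b = false)) w := by
  intro w
  induction w with
  | nil => simp [good]
  | cons a t ih =>
    cases t with
    | nil => simp [good]
    | cons b r =>
      rw [List.isChain_cons_cons, good_cc, ← ih]
      tauto

theorem good_reverse {w : List Char} (h : good w = true) : good w.reverse = true := by
  rw [good_iff_chain] at h ⊢
  rw [List.isChain_reverse]
  exact h.imp (fun a b hab => ⟨Ne.symm hab.1, hab.2.symm⟩)

theorem good_append_right : ∀ {u v : List Char}, good (u ++ v) = true → good v = true := by
  intro u
  induction u with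
  | nil => exact fun h => h
  | cons a u' ih => intro v h; exact ih (good_tail h)

theorem foldl_push_of_good : ∀ (w st : List Char), good (w.reverse ++ st) = true →
    w.foldl push st = w.reverse ++ st := by
  intro w
  induction w with
  | nil => intro st _; rfl
  | cons c w' ih =>
    intro st h
    have h' : good (c :: st) = true := good_append_right (u := w'.reverse) (by simpa using h)
    simp only [List.foldl_cons, push_eq_cons h']
    rw [ih (c :: st) (by simpa using h)]
    simp

theorem reduceLoopA_eq : ∀ (n : Nat) (w : List Char), w.length ≤ n →
    reduceLoopA w = (w.foldl push []).reverse := by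
  intro n
  induction n with
  | zero =>
    intro w hw
    have hwn : w = [] := List.eq_nil_of_length_eq_zero (Nat.le_zero.mp hw)
    subst hwn
    rw [reduceLoopA]
    simp [show onePassA [] = [] by decide]
  | succ n ih =>
    intro w hw
    by_cases h : onePassA w = w
    · rw [reduceLoopA]
      rw [dif_pos h]
      have hg : good w = true := fix_good h
      rw [foldl_push_of_good w [] (by simpa using good_reverse hg)]
      simpa using h
    · rw [reduceLoopA]
      rw [dif_neg h]
      rw [ih (onePassA w) (by have := onePassA_lt h; omega)]
      rw [foldl_push_onePass]

theorem reduceWordA_eq (w : List Char) : reduceWordA w = (w.foldl push []).reverse := by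
  by_cases h : w = []
  · subst h; rfl
  · rw [reduceWordA, if_neg h]
    exact reduceLoopA_eq w.length w le_rfl

theorem step_klein {ch : Char} (hK : isKlein ch = true) (b : Bool) (L R : List (List Char)) :
    bStep (b, (L.flatten.foldl push [], R.flatten.foldl push [])) ch
      = (b, ((aStep ((if b then 1 else 0 : Int), (L, R)) ch).2.1.flatten.foldl push [],
             (aStep ((if b then 1 else 0 : Int), (L, R)) ch).2.2.flatten.foldl push []))
    ∧ (aStep ((if b then 1 else 0 : Int), (L, R)) ch).1 = (if b then 1 else 0 : Int) := by
  rcases kleinCases hK with h | h | h <;> subst h <;> cases b <;>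
    simp [aStep, bStep, projA, contribB, isKlein]

theorem main_fold : ∀ (cs : List Char) (b : Bool) (L R : List (List Char)),
      (cs.foldl bStep (b, (L.flatten.foldl push [], R.flatten.foldl push []))).2.1
        = (cs.foldl aStep ((if b then 1 else 0 : Int), (L, R))).2.1.flatten.foldl push []
    ∧ (cs.foldl bStep (b, (L.flatten.foldl push [], R.flatten.foldl push []))).2.2
        = (cs.foldl aStep ((if b then 1 else 0 : Int), (L, R))).2.2.flatten.foldl push [] := by
  intro cs
  induction cs with
  | nil => intro b L R; exact ⟨rfl, rfl⟩
  | cons ch cs' ih =>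
    intro b L R
    by_cases hch : ch = 'a'
    · subst hch
      simp only [List.foldl_cons]
      rw [show aStep ((if b then 1 else 0 : Int), (L, R)) 'a'
            = ((if !b then 1 else 0 : Int), (L, R)) from by cases b <;> simp [aStep]]
      rw [show bStep (b, (L.flatten.foldl push [], R.flatten.foldl push [])) 'a'
            = ((!b), (L.flatten.foldl push [], R.flatten.foldl push [])) from by simp [bStep]]
      exact ih (!b) L R
    · by_cases hK : isKlein ch = true
      · obtain ⟨h1, h2⟩ := step_klein hK b L R
        simp only [List.foldl_cons, h1]
        set A := aStep ((if b then 1 else 0 : Int), (L, R)) ch with hAdef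
        rw [show A = ((if b then 1 else 0 : Int), (A.2.1, A.2.2)) from by
          rw [Prod.mk.eta, ← h2, Prod.mk.eta]]
        exact ih b A.2.1 A.2.2
      · have h3 : ¬(ch = 'b' ∨ ch = 'c' ∨ ch = 'd') := fun hc => hK (by
          rcases hc with h | h | h <;> simp [isKlein, h])
        have hb : ¬ ch = 'b' := fun h => h3 (Or.inl h)
        have hcc : ¬ ch = 'c' := fun h => h3 (Or.inr (Or.inl h))
        have hdd : ¬ ch = 'd' := fun h => h3 (Or.inr (Or.inr h))
        have hA : projA ch = none := by simp [projA, hb, hcc, hdd]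
        simp only [List.foldl_cons, aStep, bStep, if_neg hch, hA, if_neg hK]
        exact ih b L R

-- ===== VERDICT (by name: the statement is the Claim_ definition above) =====
theorem compute_projections_spec : Claim_equal_compute_projections := by
  intro word _
  obtain ⟨h1, h2⟩ := main_fold word.toList false [] []
  simp only [List.flatten_nil, List.foldl_nil, Bool.false_eq_true, if_false] at h1 h2
  simp only [Spec_compute_projections, compute_projections, compute_projections_alt]
  rw [reduceWordA_eq, reduceWordA_eq, h1, h2]
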